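-- pv_equiv track=rewrite | github.com/ryantjen/william | calendar_data.py | _optimal_chunk_sizes
-- ===== SOURCE A (Python) =====
-- from typing import List, Dict, Any, Optional
--
-- def _optimal_chunk_sizes(total_mins: int) -> List[int]:
--     """
--     Split total_mins into chunks of 15, 25, 30, 45, or 60 min.
--     Prefer fewer, longer chunks for deep work; use 25-30 for shorter sessions.
--     """
--     if total_mins <= 0:
--         return []
--     preferred = [60, 45, 30, 25, 15]
--     chunks = []
--     remaining = total_mins
--     while remaining > 0:
--         used = False
--         for size in preferred:
--             if size <= remaining:
--                 chunks.append(size)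
--                 remaining -= size
--                 used = True
--                 break
--         if not used:
--             # Merge remainder into last chunk
--             if chunks:
--                 chunks[-1] += remaining
--             else:
--                 chunks.append(remaining)
--             break
--     return chunks
-- ===== SOURCE B (Python) =====
-- def _optimal_chunk_sizes(total_mins: int):
--     if total_mins <= 0:
--         return []
--     n, r = divmod(total_mins, 60)
--     if r == 0:
--         return [60] * n
--     if r >= 15:
--         return [60] * n + [r]
--     if n > 0:
--         return [60] * (n - 1) + [60 + r]
--     return [total_mins]
-- ===== Notes on version B (the rewrite author's own statement) =====
-- stated objective: simpler
-- what changed: Replaces the greedy subtraction loop over preferred chunk sizes with a single divmod(total_mins, 60) and direct list construction from the quotient/remainder bands.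
import Mathlib
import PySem

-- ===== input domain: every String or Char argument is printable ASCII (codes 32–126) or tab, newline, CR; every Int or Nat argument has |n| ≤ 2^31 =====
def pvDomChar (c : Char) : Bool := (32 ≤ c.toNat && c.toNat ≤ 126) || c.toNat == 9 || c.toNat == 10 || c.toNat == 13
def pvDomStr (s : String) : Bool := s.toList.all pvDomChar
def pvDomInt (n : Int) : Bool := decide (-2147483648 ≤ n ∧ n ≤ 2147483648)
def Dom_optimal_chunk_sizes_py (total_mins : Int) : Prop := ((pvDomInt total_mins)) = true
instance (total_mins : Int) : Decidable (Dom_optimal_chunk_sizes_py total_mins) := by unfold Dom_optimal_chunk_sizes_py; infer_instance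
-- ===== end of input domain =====

-- B replaces A's greedy subtraction loop with one divmod and direct list construction (objective: simpler).

-- ===== PORT A =====
-- A's 'while remaining > 0' loop; the inner 'for size in [60,45,30,25,15]' over the
-- constant list is unrolled into the same ordered if-chain (first size ≤ remaining wins).
def aLoop (remaining : Int) (chunks : List Int) : List Int :=
  if 0 < remaining then
    if 60 ≤ remaining then aLoop (remaining - 60) (chunks ++ [60])
    else if 45 ≤ remaining then aLoop (remaining - 45) (chunks ++ [45])
    else if 30 ≤ remaining then aLoop (remaining - 30) (chunks ++ [30])
    else if 25 ≤ remaining then aLoop (remaining - 25) (chunks ++ [25])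
    else if 15 ≤ remaining then aLoop (remaining - 15) (chunks ++ [15])
    else
      -- merge remainder into last chunk
      if chunks.isEmpty then [remaining]
      else chunks.dropLast ++ [chunks.getLast! + remaining]
  else chunks
termination_by remaining.toNat
decreasing_by all_goals omega

def optimal_chunk_sizes_py (total_mins : Int) : List Int :=
  if total_mins ≤ 0 then [] else aLoop total_mins []

-- ===== PORT B =====
def optimal_chunk_sizes_py_alt (total_mins : Int) : List Int :=
  if total_mins ≤ 0 then []
  else
    let n := PySem.Int.floordiv total_mins 60
    let r := PySem.Int.mod total_mins 60
    if r = 0 then List.replicate n.toNat 60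
    else if 15 ≤ r then List.replicate n.toNat 60 ++ [r]
    else if 0 < n then List.replicate (n - 1).toNat 60 ++ [60 + r]
    else [total_mins]

-- ===== PRECONDITION & SPEC =====
def Spec_optimal_chunk_sizes_py (total_mins : Int) (out : List Int) : Prop := out = optimal_chunk_sizes_py_alt total_mins
instance (total_mins : Int) (out : List Int) : Decidable (Spec_optimal_chunk_sizes_py total_mins out) := by unfold Spec_optimal_chunk_sizes_py; infer_instance

-- ===== CLAIM (what is proved, stated in full; the proofs are below) =====
def Claim_equal_optimal_chunk_sizes_py : Prop := ∀ (total_mins : Int), Dom_optimal_chunk_sizes_py total_mins → Spec_optimal_chunk_sizes_py total_mins (optimal_chunk_sizes_py total_mins)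

-- ===== LEMMAS AND PROOFS =====

-- characterization of aLoop in closed form (proof helper)
def gSpec (rem : Int) (chunks : List Int) : List Int :=
  if rem % 60 = 0 then chunks ++ List.replicate (rem / 60).toNat 60
  else if 15 ≤ rem % 60 then chunks ++ List.replicate (rem / 60).toNat 60 ++ [rem % 60]
  else if 0 < rem / 60 then chunks ++ List.replicate (rem / 60 - 1).toNat 60 ++ [60 + rem % 60]
  else if chunks.isEmpty then [rem]
  else chunks.dropLast ++ [chunks.getLast! + rem]

theorem getLast!_append_singleton (chunks : List Int) (s : Int) :
    (chunks ++ [s]).getLast! = s := by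
  induction chunks with
  | nil => rfl
  | cons a as ihh => simp [List.getLast!] at *

theorem aLoop_nonpos (rem : Int) (chunks : List Int) (h : ¬ 0 < rem) :
    aLoop rem chunks = chunks := by
  rw [aLoop]; simp [h]

theorem aLoop_small (rem : Int) (chunks : List Int) (h1 : 0 < rem) (h2 : rem < 15) :
    aLoop rem chunks =
      if chunks.isEmpty then [rem] else chunks.dropLast ++ [chunks.getLast! + rem] := by
  rw [aLoop]
  simp only [h1, if_true]
  rw [if_neg (by omega), if_neg (by omega), if_neg (by omega), if_neg (by omega),
      if_neg (by omega)]

-- after taking one sub-60 chunk s, the leftover (< 15) is merged back, yielding chunks ++ [rem]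
theorem aLoop_step_tail (s rem : Int) (chunks : List Int)
    (h0 : 0 ≤ rem - s) (hlt : rem - s < 15) :
    aLoop (rem - s) (chunks ++ [s]) = chunks ++ [rem] := by
  by_cases hz : rem - s = 0
  · rw [aLoop_nonpos _ _ (by omega)]
    have : s = rem := by omega
    rw [this]
  · rw [aLoop_small _ _ (by omega) (by omega)]
    rw [if_neg (by simp), List.dropLast_concat, getLast!_append_singleton]
    have : s + (rem - s) = rem := by omega
    rw [this]

theorem gSpec_mid (rem : Int) (chunks : List Int) (h15 : 15 ≤ rem) (h60 : ¬ 60 ≤ rem) :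
    gSpec rem chunks = chunks ++ [rem] := by
  unfold gSpec
  have hd : rem / 60 = 0 := by omega
  have hm : rem % 60 = rem := by omega
  simp [hd, hm, h15, show rem ≠ 0 by omega]

theorem aLoop_eq_gSpec (k : Nat) :
    ∀ (rem : Int) (chunks : List Int), rem.toNat ≤ k → 0 < rem →
      aLoop rem chunks = gSpec rem chunks := by
  induction k with
  | zero => intro rem chunks hk hpos; omega
  | succ k ih =>
    intro rem chunks hk hpos
    rw [aLoop]
    simp only [hpos, if_true]
    by_cases h60 : 60 ≤ rem
    · rw [if_pos h60]
      by_cases heq : rem = 60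
      · subst heq
        rw [aLoop_nonpos _ _ (by omega)]
        norm_num [gSpec]
      · rw [ih (rem - 60) (chunks ++ [60]) (by omega) (by omega)]
        unfold gSpec
        have hd : (rem - 60) / 60 = rem / 60 - 1 := by omega
        have hm : (rem - 60) % 60 = rem % 60 := by omega
        have hn1 : 1 ≤ rem / 60 := by omega
        rw [hd, hm]
        by_cases hr0 : rem % 60 = 0
        · rw [if_pos hr0, if_pos hr0]
          have ht : (rem / 60).toNat = ((rem / 60 - 1).toNat) + 1 := by omega
          rw [ht, List.replicate_succ]
          simp
        · rw [if_neg hr0, if_neg hr0]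
          by_cases hr15 : 15 ≤ rem % 60
          · rw [if_pos hr15, if_pos hr15]
            have ht : (rem / 60).toNat = ((rem / 60 - 1).toNat) + 1 := by omega
            rw [ht, List.replicate_succ]
            simp
          · rw [if_neg hr15, if_neg hr15, if_pos (by omega : 0 < rem / 60)]
            by_cases hn2 : 0 < rem / 60 - 1
            · rw [if_pos hn2]
              have ht : (rem / 60 - 1).toNat = ((rem / 60 - 1 - 1).toNat) + 1 := by omega
              rw [ht, List.replicate_succ]
              simp
            · rw [if_neg hn2, if_neg (by simp), List.dropLast_concat,
                  getLast!_append_singleton]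
              have hrr : rem - 60 = rem % 60 := by omega
              have ht : (rem / 60 - 1).toNat = 0 := by omega
              rw [hrr, ht]
              simp
    · rw [if_neg h60]
      by_cases h45 : 45 ≤ rem
      · rw [if_pos h45, aLoop_step_tail 45 rem chunks (by omega) (by omega),
            gSpec_mid rem chunks (by omega) h60]
      · rw [if_neg h45]
        by_cases h30 : 30 ≤ rem
        · rw [if_pos h30, aLoop_step_tail 30 rem chunks (by omega) (by omega),
              gSpec_mid rem chunks (by omega) h60]
        · rw [if_neg h30]
          by_cases h25 : 25 ≤ rem
          · rw [if_pos h25, aLoop_step_tail 25 rem chunks (by omega) (by omega),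
                gSpec_mid rem chunks (by omega) h60]
          · rw [if_neg h25]
            by_cases h15 : 15 ≤ rem
            · rw [if_pos h15, aLoop_step_tail 15 rem chunks (by omega) (by omega),
                  gSpec_mid rem chunks h15 h60]
            · rw [if_neg h15]
              unfold gSpec
              have hd : rem / 60 = 0 := by omega
              have hm : rem % 60 = rem := by omega
              simp [hd, hm, show rem ≠ 0 by omega, show ¬ 15 ≤ rem by omega]

-- ===== VERDICT (by name: the statement is the Claim_ definition above) =====
theorem optimal_chunk_sizes_py_spec : Claim_equal_optimal_chunk_sizes_py := by
  unfold Claim_equal_optimal_chunk_sizes_py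
  intro t _
  unfold Spec_optimal_chunk_sizes_py optimal_chunk_sizes_py optimal_chunk_sizes_py_alt
  by_cases hle : t ≤ 0
  · simp [hle]
  · simp only [hle, if_false]
    have hpos : 0 < t := by omega
    rw [aLoop_eq_gSpec t.toNat t [] le_rfl hpos]
    unfold gSpec
    rw [PySem.Int.floordiv_eq_ediv_of_pos (by omega), PySem.Int.mod_eq_emod_of_pos (by omega)]
    by_cases hr0 : t % 60 = 0
    · simp [hr0]
    · by_cases hr15 : 15 ≤ t % 60
      · simp [hr0, hr15]
      · by_cases hn : 0 < t / 60
        · simp [hr0, hr15, hn]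
        · simp [hr0, hr15, hn, List.isEmpty]
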